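-- pv_equiv track=rewrite | github.com/aguo921/engsci263-or-project | route_generation.py | remove_duplicate_routes
-- ===== SOURCE A (Python) =====
-- def remove_duplicate_routes(routes):
--     """ Remove routes visiting identical stores.
--
--         Parameters
--         ----------
--         routes : list
--             List of routes.
--
--         Returns
--         -------
--         routes : list
--             List of routes with duplicates removed.
--     """
--     routes_to_remove = []
--
--     # loop over every possible pair of routes
--     for i in range(len(routes)):
--         for j in range(i + 1, len(routes)):
--             # remove a route if they contain identical stores
--             if set(routes[i][0]) == set(routes[j][0]):
--                 # remove route with higher cost
--                 if routes[i][1] < routes[j][1]: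
--                     routes_to_remove.append(j)
--                 else:
--                     routes_to_remove.append(i)
--
--     routes = [route for i, route in enumerate(routes) if i not in routes_to_remove]
--
--     return routes
-- ===== SOURCE B (Python) =====
-- def remove_duplicate_routes(routes):
--     """ Remove routes visiting identical stores.
--
--         One pass with a dictionary keyed by the (canonicalised) store set:
--         per store set keep the cheapest route, breaking cost ties in favour
--         of the later route; then keep order with a final filter.
--     """
--     best = {}
--     for i, (stores, cost) in enumerate(routes):
--         key = tuple(sorted(set(stores)))
--         if key not in best or cost <= best[key][0]:
--             best[key] = (cost, i)
--     return [route for i, route in enumerate(routes)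
--             if best[tuple(sorted(set(route[0])))][1] == i]
-- ===== Notes on version B (the rewrite author's own statement) =====
-- stated objective: faster
-- what changed: Replaces the O(n^2) all-pairs comparison that accumulates a removal-index list with a single dictionary pass keyed by the canonicalised store set, keeping per group the minimum cost with ties going to the later route, then one order-preserving filter.
import Mathlib
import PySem

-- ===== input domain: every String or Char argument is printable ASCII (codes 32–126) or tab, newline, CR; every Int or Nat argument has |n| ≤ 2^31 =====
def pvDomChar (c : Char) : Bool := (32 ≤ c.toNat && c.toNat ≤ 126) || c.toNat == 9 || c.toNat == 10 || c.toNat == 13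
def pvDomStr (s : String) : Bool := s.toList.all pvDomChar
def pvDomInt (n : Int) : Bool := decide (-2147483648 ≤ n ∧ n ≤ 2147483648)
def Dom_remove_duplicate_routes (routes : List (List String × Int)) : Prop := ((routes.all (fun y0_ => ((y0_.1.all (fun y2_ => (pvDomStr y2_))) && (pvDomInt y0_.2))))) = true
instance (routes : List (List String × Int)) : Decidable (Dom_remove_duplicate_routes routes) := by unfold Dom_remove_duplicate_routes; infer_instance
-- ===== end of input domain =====

-- B replaces A's O(n^2) all-pairs removal-list construction by one dictionary pass
-- keyed by the canonicalised store set (min cost per group, cost ties to the later route).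

-- ===== PORT A =====
def remove_duplicate_routes (routes : List (List String × Int)) : List (List String × Int) :=
  -- routes_to_remove built by the double loop over index pairs
  let routes_to_remove : List Int :=
    (PySem.List.pyRange 0 (routes.length : Int) 1).foldl (fun acc i =>
      (PySem.List.pyRange (i + 1) (routes.length : Int) 1).foldl (fun acc2 j =>
        if PySem.Set.equal (PySem.Set.ofList (PySem.List.pyGetD routes i ([], 0)).1)
                           (PySem.Set.ofList (PySem.List.pyGetD routes j ([], 0)).1) then
          if (PySem.List.pyGetD routes i ([], 0)).2 < (PySem.List.pyGetD routes j ([], 0)).2 then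
            acc2 ++ [j]
          else
            acc2 ++ [i]
        else acc2) acc) []
  -- [route for i, route in enumerate(routes) if i not in routes_to_remove]
  ((PySem.List.enumerate routes).filter (fun p => !(routes_to_remove.contains p.1))).map (·.2)

-- ===== PORT B =====
-- key = tuple(sorted(set(stores)))
def pvBKey (stores : List String) : List String :=
  PySem.List.sorted (PySem.Set.ofList stores) (fun x => x) false

def pvBStep (d : PySem.Dict (List String) (Int × Int)) (p : Int × (List String × Int)) :
    PySem.Dict (List String) (Int × Int) :=
  let key := pvBKey p.2.1
  match d.get? key with
  | none => d.insert key (p.2.2, p.1)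
  | some v => if p.2.2 ≤ v.1 then d.insert key (p.2.2, p.1) else d

def remove_duplicate_routes_alt (routes : List (List String × Int)) : List (List String × Int) :=
  let best := (PySem.List.enumerate routes).foldl pvBStep PySem.Dict.empty
  ((PySem.List.enumerate routes).filter
    (fun p => (best.getD (pvBKey p.2.1) (0, 0)).2 == p.1)).map (·.2)

-- ===== PRECONDITION & SPEC =====
def Spec_remove_duplicate_routes (routes : List (List String × Int)) (out : List (List String × Int)) : Prop := out = remove_duplicate_routes_alt routes
instance (routes : List (List String × Int)) (out : List (List String × Int)) : Decidable (Spec_remove_duplicate_routes routes out) := by unfold Spec_remove_duplicate_routes; infer_instance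

-- ===== CLAIM (what is proved, stated in full; the proofs are below) =====
def Claim_equal_remove_duplicate_routes : Prop := ∀ (routes : List (List String × Int)), Dom_remove_duplicate_routes routes → Spec_remove_duplicate_routes routes (remove_duplicate_routes routes)

-- ===== LEMMAS AND PROOFS =====


-- ===== LEMMAS AND PROOFS =====

-- proof-only abbreviations
def pvCost (routes : List (List String × Int)) (i : Int) : Int :=
  (PySem.List.pyGetD routes i ([], 0)).2

def pvStores (routes : List (List String × Int)) (i : Int) : List String :=
  (PySem.List.pyGetD routes i ([], 0)).1

def pvSame (routes : List (List String × Int)) (i j : Int) : Prop :=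
  PySem.Set.equal (PySem.Set.ofList (pvStores routes i)) (PySem.Set.ofList (pvStores routes j)) = true

-- the survival predicate both programs compute
def pvGood (routes : List (List String × Int)) (k : Int) : Prop :=
  ∀ j : Int, 0 ≤ j → j < (routes.length : Int) → pvSame routes k j →
    (j < k → pvCost routes k ≤ pvCost routes j) ∧ (k < j → pvCost routes k < pvCost routes j)

-- the A-side removal list
def pvRtr (routes : List (List String × Int)) : List Int :=
  (PySem.List.pyRange 0 (routes.length : Int) 1).foldl (fun acc i =>
    (PySem.List.pyRange (i + 1) (routes.length : Int) 1).foldl (fun acc2 j =>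
      if PySem.Set.equal (PySem.Set.ofList (PySem.List.pyGetD routes i ([], 0)).1)
                         (PySem.Set.ofList (PySem.List.pyGetD routes j ([], 0)).1) then
        if (PySem.List.pyGetD routes i ([], 0)).2 < (PySem.List.pyGetD routes j ([], 0)).2 then
          acc2 ++ [j]
        else
          acc2 ++ [i]
      else acc2) acc) []

-- the B-side update on a single dictionary slot
def pvUpd (s : List String) (o : Option (Int × Int)) (p : Int × (List String × Int)) :
    Option (Int × Int) :=
  if pvBKey p.2.1 = s then
    (match o with
     | none => some (p.2.2, p.1)
     | some v => if p.2.2 ≤ v.1 then some (p.2.2, p.1) else some v)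
  else o

theorem pvSame_symm (routes : List (List String × Int)) (i j : Int)
    (h : pvSame routes i j) : pvSame routes j i := by
  unfold pvSame at *
  rw [PySem.Set.equal_iff] at *
  intro x
  exact (h x).symm

theorem pvKey_eq_iff (xs ys : List String) :
    pvBKey xs = pvBKey ys ↔ PySem.Set.equal (PySem.Set.ofList xs) (PySem.Set.ofList ys) = true := by
  constructor
  · intro h
    rw [PySem.Set.equal_iff]
    intro x
    have h1 := PySem.List.mem_sorted (xs := PySem.Set.ofList xs) (key := fun x => x) (rev := false) (x := x)
    have h2 := PySem.List.mem_sorted (xs := PySem.Set.ofList ys) (key := fun x => x) (rev := false) (x := x)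
    unfold pvBKey at h
    rw [PySem.Set.mem_ofList, PySem.Set.mem_ofList] at *
    rw [← h1, ← h2, h]
  · intro h
    have hmem : ∀ x, x ∈ PySem.Set.ofList xs ↔ x ∈ PySem.Set.ofList ys :=
      (PySem.Set.equal_iff _ _).mp h
    have hperm : (PySem.List.sorted (PySem.Set.ofList ys) (fun x => x) false).Perm (PySem.Set.ofList xs) := by
      refine (PySem.List.sorted_perm _ _ _).trans ?_
      rw [List.perm_ext_iff_of_nodup (PySem.Set.nodup_ofList _) (PySem.Set.nodup_ofList _)]
      intro a
      exact (hmem a).symm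
    have hpair := PySem.List.sorted_ofList_pairwise_lt (xs := ys)
    unfold pvBKey
    exact PySem.List.sorted_eq_of_perm_of_pairwise_lt _ _ _ hperm hpair

theorem pvFoldMem {α : Type} (P : α → Int → Prop) (f : List Int → α → List Int)
    (hf : ∀ acc i x, x ∈ f acc i ↔ x ∈ acc ∨ P i x) :
    ∀ (l : List α) (acc : List Int) (x : Int),
      x ∈ l.foldl f acc ↔ x ∈ acc ∨ ∃ i ∈ l, P i x := by
  intro l
  induction l with
  | nil => simp
  | cons a l ih =>
    intro acc x
    rw [List.foldl_cons, ih, hf]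
    simp only [List.mem_cons]
    constructor
    · rintro (⟨h | h⟩ | ⟨i, hi, h⟩)
      · exact Or.inl h
      · exact Or.inr ⟨a, Or.inl rfl, h⟩
      · exact Or.inr ⟨i, Or.inr hi, h⟩
    · rintro (h | ⟨i, hi | hi, h⟩)
      · exact Or.inl (Or.inl h)
      · exact Or.inl (Or.inr (hi ▸ h))
      · exact Or.inr ⟨i, hi, h⟩

theorem pvRtr_mem (routes : List (List String × Int)) (x : Int) :
    x ∈ pvRtr routes ↔ ∃ i j : Int, 0 ≤ i ∧ i < j ∧ j < (routes.length : Int) ∧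
      pvSame routes i j ∧ x = (if pvCost routes i < pvCost routes j then j else i) := by
  have hinner : ∀ (i : Int) (acc : List Int) (y : Int),
      y ∈ (PySem.List.pyRange (i + 1) (routes.length : Int) 1).foldl (fun acc2 j =>
        if PySem.Set.equal (PySem.Set.ofList (PySem.List.pyGetD routes i ([], 0)).1)
                           (PySem.Set.ofList (PySem.List.pyGetD routes j ([], 0)).1) then
          if (PySem.List.pyGetD routes i ([], 0)).2 < (PySem.List.pyGetD routes j ([], 0)).2 then
            acc2 ++ [j]
          else
            acc2 ++ [i]
        else acc2) acc ↔
      y ∈ acc ∨ ∃ j ∈ PySem.List.pyRange (i + 1) (routes.length : Int) 1,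
        pvSame routes i j ∧ y = (if pvCost routes i < pvCost routes j then j else i) := by
    intro i acc y
    have hstep : ∀ (acc2 : List Int) (j y2 : Int),
        y2 ∈ (if PySem.Set.equal (PySem.Set.ofList (PySem.List.pyGetD routes i ([], 0)).1)
                           (PySem.Set.ofList (PySem.List.pyGetD routes j ([], 0)).1) then
          if (PySem.List.pyGetD routes i ([], 0)).2 < (PySem.List.pyGetD routes j ([], 0)).2 then
            acc2 ++ [j]
          else
            acc2 ++ [i]
        else acc2) ↔
        y2 ∈ acc2 ∨ (pvSame routes i j ∧ y2 = (if pvCost routes i < pvCost routes j then j else i)) := by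
      intro acc2 j y2
      unfold pvSame pvStores pvCost
      split_ifs with h1 h2 <;> simp [*]
    exact pvFoldMem _ _ hstep _ acc y
  have houter := pvFoldMem _ _ (fun acc i y => hinner i acc y)
    (PySem.List.pyRange 0 (routes.length : Int) 1) [] x
  refine (houter.trans ?_)
  simp only [List.not_mem_nil, false_or, PySem.List.mem_pyRange_one]
  constructor
  · rintro ⟨i, ⟨hi0, hin⟩, j, ⟨hj1, hjn⟩, hs, hx⟩
    exact ⟨i, j, hi0, by omega, hjn, hs, hx⟩
  · rintro ⟨i, j, hi0, hij, hjn, hs, hx⟩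
    exact ⟨i, ⟨hi0, by omega⟩, j, ⟨by omega, hjn⟩, hs, hx⟩

theorem pvA_kept (routes : List (List String × Int)) (k : Int)
    (hk0 : 0 ≤ k) (hkn : k < (routes.length : Int)) :
    (¬ k ∈ pvRtr routes) ↔ pvGood routes k := by
  rw [pvRtr_mem]
  constructor
  · intro h j hj0 hjn hsame
    constructor
    · intro hjk
      by_contra hlt
      rw [not_le] at hlt
      exact h ⟨j, k, hj0, hjk, hkn, pvSame_symm _ _ _ hsame, by rw [if_pos hlt]⟩
    · intro hkj
      by_contra hge
      rw [not_lt] at hge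
      exact h ⟨k, j, hk0, hkj, hjn, hsame, by rw [if_neg (not_lt.mpr hge)]⟩
  · rintro hg ⟨i, j, hi0, hij, hjn, hs, hx⟩
    by_cases hlt : pvCost routes i < pvCost routes j
    · rw [if_pos hlt] at hx
      subst hx
      have := (hg i hi0 (by omega) (pvSame_symm _ _ _ hs)).1 hij
      omega
    · rw [if_neg hlt] at hx
      subst hx
      have := (hg j (by omega) hjn hs).2 hij
      omega

theorem pvGet?_pvBStep (d : PySem.Dict (List String) (Int × Int))
    (p : Int × (List String × Int)) (s : List String) :
    (pvBStep d p).get? s = pvUpd s (d.get? s) p := by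
  unfold pvBStep pvUpd
  by_cases hs : pvBKey p.2.1 = s
  · subst hs
    cases h : d.get? (pvBKey p.2.1) with
    | none => simp [h, PySem.Dict.get?_insert_self]
    | some v =>
      simp only [h]
      by_cases hle : p.2.2 ≤ v.1
      · simp [hle, PySem.Dict.get?_insert_self]
      · simp [hle, h]
  · cases h : d.get? (pvBKey p.2.1) with
    | none => simp [hs, h, PySem.Dict.get?_insert_of_ne d _ (Ne.symm hs)]
    | some v =>
      by_cases hle : p.2.2 ≤ v.1
      · simp [hs, h, hle, PySem.Dict.get?_insert_of_ne d _ (Ne.symm hs)]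
      · simp [hs, h, hle]

theorem pvGet?_foldl (ps : List (Int × (List String × Int)))
    (d : PySem.Dict (List String) (Int × Int)) (s : List String) :
    (ps.foldl pvBStep d).get? s = ps.foldl (pvUpd s) (d.get? s) := by
  induction ps generalizing d with
  | nil => rfl
  | cons p ps ih => simp only [List.foldl_cons, ih, pvGet?_pvBStep]

theorem pvFstInj (ps : List (Int × (List String × Int)))
    (hinc : ps.Pairwise (fun p q => p.1 < q.1)) :
    ∀ p ∈ ps, ∀ q ∈ ps, p.1 = q.1 → p = q := by
  induction ps with
  | nil => simp
  | cons a ps ih =>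
    rw [List.pairwise_cons] at hinc
    intro p hp q hq hpq
    rw [List.mem_cons] at hp hq
    rcases hp with hp | hp <;> rcases hq with hq | hq
    · rw [hp, hq]
    · exact absurd hpq (by subst hp; exact (ne_of_lt (hinc.1 q hq)))
    · exact absurd hpq.symm (by subst hq; exact (ne_of_lt (hinc.1 p hp)))
    · exact ih hinc.2 p hp q hq hpq

theorem pvSound (ps : List (Int × (List String × Int))) (s : List String)
    (hinc : ps.Pairwise (fun p q => p.1 < q.1)) :
    (ps.foldl (pvUpd s) none = none → ∀ p ∈ ps, pvBKey p.2.1 ≠ s) ∧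
    (∀ m a, ps.foldl (pvUpd s) none = some (m, a) →
      ∃ p, p ∈ ps ∧ p.1 = a ∧ p.2.2 = m ∧ pvBKey p.2.1 = s ∧
        ∀ q ∈ ps, pvBKey q.2.1 = s → (q.1 < a → m ≤ q.2.2) ∧ (a < q.1 → m < q.2.2)) := by
  revert hinc
  induction ps using List.reverseRecOn with
  | nil =>
    intro _
    constructor
    · intro _
      simp
    · intro m a h
      simp at h
  | append_singleton qs x ih =>
    intro hinc
    rw [List.pairwise_append] at hinc
    have hqs := hinc.1
    have hltx : ∀ q ∈ qs, q.1 < x.1 := fun q hq => hinc.2.2 q hq x (List.mem_singleton_self x)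
    obtain ⟨ihnone, ihsome⟩ := ih hqs
    have hfstinj := pvFstInj qs hqs
    simp only [List.foldl_append, List.foldl_cons, List.foldl_nil]
    by_cases hx : pvBKey x.2.1 = s
    · constructor
      · intro h
        exfalso
        cases hr : qs.foldl (pvUpd s) none with
        | none => simp [pvUpd, hx, hr] at h
        | some v =>
          rw [hr] at h
          unfold pvUpd at h
          rw [if_pos hx] at h
          by_cases hle : x.2.2 ≤ v.1 <;> simp [hle] at h
      · intro m a h
        cases hr : qs.foldl (pvUpd s) none with
        | none =>
          rw [hr] at h
          unfold pvUpd at h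
          rw [if_pos hx] at h
          simp only [Option.some.injEq, Prod.mk.injEq] at h
          obtain ⟨hm, ha⟩ := h
          refine ⟨x, List.mem_append_right _ (List.mem_singleton_self x), ha, hm, hx, ?_⟩
          intro q hq hqkey
          rcases List.mem_append.mp hq with hq | hq
          · exact absurd hqkey (ihnone hr q hq)
          · rw [List.mem_singleton.mp hq, ← ha]
            constructor <;> intro hlt <;> exact absurd hlt (lt_irrefl _)
        | some v =>
          obtain ⟨m0, a0⟩ := v
          obtain ⟨p0, hp0mem, hp01, hp02, hp0key, hp0best⟩ := ihsome m0 a0 hr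
          rw [hr] at h
          unfold pvUpd at h
          rw [if_pos hx] at h
          by_cases hle : x.2.2 ≤ m0
          · simp only [if_pos hle, Option.some.injEq, Prod.mk.injEq] at h
            obtain ⟨hm, ha⟩ := h
            refine ⟨x, List.mem_append_right _ (List.mem_singleton_self x), ha, hm, hx, ?_⟩
            intro q hq hqkey
            rcases List.mem_append.mp hq with hq | hq
            · have hqx : q.1 < a := by rw [← ha]; exact hltx q hq
              refine ⟨fun _ => ?_, fun hcon => absurd (lt_trans hqx hcon) (lt_irrefl _)⟩
              rcases lt_trichotomy q.1 a0 with hc | hc | hc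
              · have := (hp0best q hq hqkey).1 hc
                omega
              · have : q = p0 := hfstinj q hq p0 hp0mem (by rw [hc, hp01])
                rw [this, hp02]
                omega
              · have := (hp0best q hq hqkey).2 hc
                omega
            · rw [List.mem_singleton.mp hq, ← ha]
              constructor <;> intro hlt <;> exact absurd hlt (lt_irrefl _)
          · simp only [if_neg hle, Option.some.injEq, Prod.mk.injEq] at h
            obtain ⟨hm, ha⟩ := h
            rw [← hm, ← ha]
            refine ⟨p0, List.mem_append_left _ hp0mem, hp01, hp02, hp0key, ?_⟩
            intro q hq hqkey
            rcases List.mem_append.mp hq with hq | hq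
            · exact hp0best q hq hqkey
            · rw [List.mem_singleton.mp hq]
              have hax : a0 < x.1 := by rw [← hp01]; exact hltx p0 hp0mem
              exact ⟨fun hcon => absurd (lt_trans hcon hax) (lt_irrefl _), fun _ => by omega⟩
    · have heq : pvUpd s (qs.foldl (pvUpd s) none) x = qs.foldl (pvUpd s) none := by
        unfold pvUpd
        rw [if_neg hx]
      rw [heq]
      constructor
      · intro h q hq
        rcases List.mem_append.mp hq with hq | hq
        · exact ihnone h q hq
        · rw [List.mem_singleton.mp hq]
          exact hx
      · intro m a h
        obtain ⟨p0, hp0mem, hp01, hp02, hp0key, hp0best⟩ := ihsome m a h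
        refine ⟨p0, List.mem_append_left _ hp0mem, hp01, hp02, hp0key, ?_⟩
        intro q hq hqkey
        rcases List.mem_append.mp hq with hq | hq
        · exact hp0best q hq hqkey
        · exact absurd hqkey (by rw [List.mem_singleton.mp hq]; exact hx)

theorem pvEntryCost (routes : List (List String × Int)) (k : Nat) (hk : k < routes.length) :
    pvCost routes (k : Int) = (routes[k]).2 := by
  unfold pvCost
  rw [PySem.List.pyGetD_natCast, List.getD_eq_getElem _ _ hk]

theorem pvEntryStores (routes : List (List String × Int)) (k : Nat) (hk : k < routes.length) :
    pvStores routes (k : Int) = (routes[k]).1 := by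
  unfold pvStores
  rw [PySem.List.pyGetD_natCast, List.getD_eq_getElem _ _ hk]

theorem pvB_kept (routes : List (List String × Int)) (k : Nat) (hk : k < routes.length) :
    ((((PySem.List.enumerate routes 0).foldl pvBStep PySem.Dict.empty).getD
        (pvBKey (routes[k]).1) (0, 0)).2 = (k : Int)) ↔ pvGood routes (k : Int) := by
  have hfold : ((PySem.List.enumerate routes 0).foldl pvBStep PySem.Dict.empty).get?
      (pvBKey (routes[k]).1) = (PySem.List.enumerate routes 0).foldl (pvUpd (pvBKey (routes[k]).1)) none := by
    rw [pvGet?_foldl, PySem.Dict.get?_empty]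
  obtain ⟨hnone, hsome⟩ := pvSound (PySem.List.enumerate routes 0) (pvBKey (routes[k]).1)
    (PySem.List.pairwise_lt_enumerate routes 0)
  have hkmem : (((k : Nat) : Int), routes[k]) ∈ PySem.List.enumerate routes 0 := by
    rw [PySem.List.mem_enumerate_iff]
    exact ⟨k, hk, by simp⟩
  cases hres : (PySem.List.enumerate routes 0).foldl (pvUpd (pvBKey (routes[k]).1)) none with
  | none => exact absurd rfl (hnone hres _ hkmem)
  | some v =>
    obtain ⟨m, a⟩ := v
    rw [PySem.Dict.getD_eq_get?_getD, hfold, hres]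
    simp only [Option.getD_some]
    obtain ⟨p0, hp0mem, hp01, hp02, hp0key, hp0best⟩ := hsome m a hres
    obtain ⟨k0, hk0, hp0⟩ := (PySem.List.mem_enumerate_iff _ _ _).mp hp0mem
    rw [zero_add] at hp0
    constructor
    · intro ha j hj0 hjn hsame
      -- a = k : the dictionary kept index k; derive the survival predicate
      have hjn' : j.toNat < routes.length := by omega
      have hj : j = ((j.toNat : Nat) : Int) := by omega
      have hqmem : (((j.toNat : Nat) : Int), routes[j.toNat]) ∈ PySem.List.enumerate routes 0 := by
        rw [PySem.List.mem_enumerate_iff]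
        exact ⟨j.toNat, hjn', by simp⟩
      have hqkey : pvBKey ((routes[j.toNat]).1) = pvBKey ((routes[k]).1) := by
        rw [pvKey_eq_iff]
        have := pvSame_symm _ _ _ hsame
        unfold pvSame at this
        rw [pvEntryStores routes k hk] at this
        rw [hj, pvEntryStores routes j.toNat hjn'] at this
        exact this
      have hbest := hp0best _ hqmem hqkey
      have hm : m = (routes[k]).2 := by
        have hp0k : p0 = (((k : Nat) : Int), routes[k]) := by
          apply pvFstInj _ (PySem.List.pairwise_lt_enumerate routes 0) p0 hp0mem _ hkmem
          rw [hp01, ha]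
        rw [← hp02, hp0k]
      rw [pvEntryCost routes k hk, hj, pvEntryCost routes j.toNat hjn']
      simp only at hbest
      rw [ha] at hbest
      constructor
      · intro hjk
        exact hm ▸ hbest.1 (by omega)
      · intro hkj
        exact hm ▸ hbest.2 (by omega)
    · intro hg
      -- the survival predicate forces the kept index to be k
      have hkey0 : PySem.Set.equal (PySem.Set.ofList ((routes[k0]).1))
          (PySem.Set.ofList ((routes[k]).1)) = true := by
        rw [← pvKey_eq_iff]
        rw [hp0] at hp0key
        exact hp0key
      have hsame : pvSame routes ((k : Nat) : Int) ((k0 : Nat) : Int) := by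
        apply pvSame_symm
        unfold pvSame
        rw [pvEntryStores routes k hk, pvEntryStores routes k0 hk0]
        exact hkey0
      have hgk0 := hg ((k0 : Nat) : Int) (Int.natCast_nonneg k0) (by omega) hsame
      have hbestk := hp0best _ hkmem rfl
      simp only at hbestk
      have ha0 : a = ((k0 : Nat) : Int) := by rw [← hp01, hp0]
      have hm0 : m = (routes[k0]).2 := by rw [← hp02, hp0]
      rw [pvEntryCost routes k hk, pvEntryCost routes k0 hk0] at hgk0
      rcases lt_trichotomy a ((k : Nat) : Int) with hc | hc | hc
      · have h1 := hbestk.2 hc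
        have h2 := hgk0.1 (by omega)
        omega
      · exact hc
      · have h1 := hbestk.1 hc
        have h2 := hgk0.2 (by omega)
        omega

-- ===== VERDICT (by name: the statement is the Claim_ definition above) =====
theorem remove_duplicate_routes_spec : Claim_equal_remove_duplicate_routes := by
  unfold Claim_equal_remove_duplicate_routes Spec_remove_duplicate_routes
  intro routes _
  show ((PySem.List.enumerate routes 0).filter (fun p => !((pvRtr routes).contains p.1))).map (·.2)
      = ((PySem.List.enumerate routes 0).filter
          (fun p => ((((PySem.List.enumerate routes 0).foldl pvBStep PySem.Dict.empty).getD
            (pvBKey p.2.1) (0, 0)).2 == p.1))).map (·.2)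
  congr 1
  apply List.filter_congr
  intro p hp
  obtain ⟨k, hk, hpk⟩ := (PySem.List.mem_enumerate_iff _ _ _).mp hp
  rw [zero_add] at hpk
  subst hpk
  rw [Bool.eq_iff_iff]
  simp only [Bool.not_eq_true', beq_iff_eq]
  rw [← Bool.not_eq_true, List.contains_iff_mem]
  rw [pvA_kept routes _ (Int.natCast_nonneg k) (by exact_mod_cast hk)]
  exact (pvB_kept routes k hk).symm
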